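-- pv_equiv track=rewrite | github.com/jmparis/advent-of-code | 2025/Day 6 - Trash Compactor/part1.py | find_nonempty_column_ranges
-- ===== SOURCE A (Python) =====
-- def find_nonempty_column_ranges(lines):
--     if not lines:
--         return []
--     maxlen = max(len(line) for line in lines)
--     padded = [line.ljust(maxlen) for line in lines]
--     # a column is a separator if every line has a space at that column
--     is_separator = [all(row[col] == ' ' for row in padded) for col in range(maxlen)]
--     ranges = []
--     in_range = False
--     start = 0
--     for i, sep in enumerate(is_separator):
--         if not sep and not in_range:
--             in_range = True
--             start = i
--         elif sep and in_range:
--             in_range = False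
--             ranges.append((start, i - 1))
--     if in_range:
--         ranges.append((start, maxlen - 1))
--     return ranges, padded
-- ===== SOURCE B (Python) =====
-- def find_nonempty_column_ranges(lines):
--     if not lines:
--         return []
--     maxlen = max(len(line) for line in lines)
--     padded = [line.ljust(maxlen) for line in lines]
--     # a column is a separator if every line has a space at that column
--     is_separator = [all(row[col] == ' ' for row in padded) for col in range(maxlen)]
--     # run-length scan: consume maximal runs of equal flags, emit a range per non-separator run
--     ranges = []
--     col = 0
--     rest = is_separator
--     while rest:
--         sep = rest[0]
--         length = 1
--         while length < len(rest) and rest[length] == sep: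
--             length += 1
--         if not sep:
--             ranges.append((col, col + length - 1))
--         col += length
--         rest = rest[length:]
--     return ranges, padded
-- ===== Notes on version B (the rewrite author's own statement) =====
-- stated objective: alternative
-- what changed: The stateful in_range/start flag scan over enumerate(is_separator) is replaced by a run-length scan that consumes each maximal run of equal separator flags at once and emits one inclusive range per non-separator run.
-- outside the precondition, e.g. on find_nonempty_column_ranges([]): A returns (), B returns ()
import Mathlib
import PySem

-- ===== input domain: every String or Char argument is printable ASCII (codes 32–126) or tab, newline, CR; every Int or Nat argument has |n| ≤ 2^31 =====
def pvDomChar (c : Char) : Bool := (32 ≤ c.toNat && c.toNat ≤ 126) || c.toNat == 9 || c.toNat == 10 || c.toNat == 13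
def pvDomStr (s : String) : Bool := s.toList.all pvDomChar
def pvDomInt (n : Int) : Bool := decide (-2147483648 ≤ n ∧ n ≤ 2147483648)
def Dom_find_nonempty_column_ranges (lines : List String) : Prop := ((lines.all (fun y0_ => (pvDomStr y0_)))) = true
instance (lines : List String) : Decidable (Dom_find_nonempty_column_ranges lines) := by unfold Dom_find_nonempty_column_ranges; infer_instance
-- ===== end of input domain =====

-- B replaces A's stateful in_range/start flag scan with a run-length scan over the
-- separator flags (one maximal run consumed per step); objective: alternative decomposition.

-- ===== PORT A =====
-- shared with B (both Pythons contain these identical lines):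
-- maxlen = max(len(line) for line in lines)   (lines nonempty under Pre_)
def pvMaxLen (lines : List String) : Nat :=
  (lines.map (fun l => l.toList.length)).foldl max 0
-- padded = [line.ljust(maxlen) for line in lines]   (ljust pads with spaces on the right; exact for any string)
def pvPadded (lines : List String) (maxlen : Nat) : List (List Char) :=
  lines.map (fun l => l.toList ++ List.replicate (maxlen - l.toList.length) ' ')
-- is_separator = [all(row[col] == ' ' for row in padded) for col in range(maxlen)]
-- row[col] is always in range since every row has length maxlen; getD is exact here
def pvIsSep (padded : List (List Char)) (maxlen : Nat) : List Bool :=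
  (List.range maxlen).map (fun col => padded.all (fun row => row.getD col ' ' == ' '))

-- the for-loop over enumerate(is_separator): state (ranges, in_range, start), i the enumerate index
def pvLoopA : List Bool → Int → List (Int × Int) → Bool → Int → List (Int × Int) × Bool × Int
  | [], _, ranges, in_range, start => (ranges, in_range, start)
  | sep :: tl, i, ranges, in_range, start =>
      if !sep && !in_range then pvLoopA tl (i + 1) ranges true i
      else if sep && in_range then pvLoopA tl (i + 1) (ranges ++ [(start, i - 1)]) false start
      else pvLoopA tl (i + 1) ranges in_range start

def find_nonempty_column_ranges (lines : List String) : (List (Int × Int)) × List String :=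
  if lines = [] then ([], [])  -- A returns a bare [] here (not a pair); excluded by Pre_
  else
    let maxlen := pvMaxLen lines
    let padded := pvPadded lines maxlen
    let is_separator := pvIsSep padded maxlen
    let st := pvLoopA is_separator 0 [] false 0
    let ranges := if st.2.1 then st.1 ++ [(st.2.2, (maxlen : Int) - 1)] else st.1
    (ranges, padded.map (fun cs => String.ofList cs))

-- ===== PORT B =====
-- the outer while: consume one maximal run of equal flags per step
-- (inner while 'length += 1' = takeWhile; 'rest = rest[length:]' = dropWhile)
def pvRunScan : List Bool → Int → List (Int × Int)
  | [], _ => []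
  | sep :: tl, col =>
      let length : Int := 1 + (tl.takeWhile (fun b => b == sep)).length
      let rest := tl.dropWhile (fun b => b == sep)
      let tail := pvRunScan rest (col + length)
      if sep then tail else (col, col + length - 1) :: tail
termination_by bs _ => bs.length
decreasing_by
  exact Nat.lt_succ_of_le (List.length_dropWhile_le _ _)

def find_nonempty_column_ranges_alt (lines : List String) : (List (Int × Int)) × List String :=
  if lines = [] then ([], [])  -- same bare-[] guard in B; excluded by Pre_
  else
    let maxlen := pvMaxLen lines
    let padded := pvPadded lines maxlen
    let is_separator := pvIsSep padded maxlen
    (pvRunScan is_separator 0, padded.map (fun cs => String.ofList cs))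

-- ===== PRECONDITION & SPEC =====
-- Pre_ excludes only the empty list, on which A (and B) return a bare list [] instead of a
-- value of the declared pair type (ranges, padded).
def Pre_find_nonempty_column_ranges (lines : List String) : Prop := lines ≠ []
instance (lines : List String) : Decidable (Pre_find_nonempty_column_ranges lines) := by unfold Pre_find_nonempty_column_ranges; infer_instance
def pvWitness_find_nonempty_column_ranges : List String := ["ab cd", " b  d"]

def Spec_find_nonempty_column_ranges (lines : List String) (out : (List (Int × Int)) × List String) : Prop := out = find_nonempty_column_ranges_alt lines
instance (lines : List String) (out : (List (Int × Int)) × List String) : Decidable (Spec_find_nonempty_column_ranges lines out) := by unfold Spec_find_nonempty_column_ranges; infer_instance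

-- ===== CLAIM (what is proved, stated in full; the proofs are below) =====
def Claim_equal_find_nonempty_column_ranges : Prop := ∀ (lines : List String), Dom_find_nonempty_column_ranges lines → Pre_find_nonempty_column_ranges lines → Spec_find_nonempty_column_ranges lines (find_nonempty_column_ranges lines)

-- ===== LEMMAS AND PROOFS =====

-- equation lemmas for the well-founded pvRunScan
theorem pvRunScan_nil (col : Int) : pvRunScan [] col = [] :=
  pvRunScan.eq_1 col

theorem pvRunScan_cons (sep : Bool) (tl : List Bool) (col : Int) :
    pvRunScan (sep :: tl) col =
      (if sep then
        pvRunScan (tl.dropWhile (fun b => b == sep)) (col + (1 + ((tl.takeWhile (fun b => b == sep)).length : Int)))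
      else
        (col, col + (1 + ((tl.takeWhile (fun b => b == sep)).length : Int)) - 1) ::
          pvRunScan (tl.dropWhile (fun b => b == sep)) (col + (1 + ((tl.takeWhile (fun b => b == sep)).length : Int)))) :=
  pvRunScan.eq_2 col sep tl

-- skipping a separator-run element by element equals skipping it all at once
theorem pvRunScan_true_cons (tl : List Bool) (i : Int) :
    pvRunScan (true :: tl) i = pvRunScan tl (i + 1) := by
  induction tl generalizing i with
  | nil => simp [pvRunScan_cons, pvRunScan_nil]
  | cons b tl' ih =>
      cases b with
      | true =>
          rw [ih, ← ih (i + 1), pvRunScan_cons, pvRunScan_cons]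
          simp only [List.takeWhile_cons, List.dropWhile_cons, BEq.rfl]
          norm_num
          congr 1
          ring
      | false =>
          rw [pvRunScan_cons]
          simp

-- the key invariant: A's flag-scan loop (plus its final flush at hi = i + |bs| - 1)
-- computes exactly B's run-length scan, in both loop states.
theorem pvLoopA_runScan (bs : List Bool) (i : Int) (ranges : List (Int × Int)) (s : Int) (hi : Int)
    (hhi : hi = i + (bs.length : Int) - 1) :
    ((let st := pvLoopA bs i ranges false s
      if st.2.1 then st.1 ++ [(st.2.2, hi)] else st.1) = ranges ++ pvRunScan bs i)
    ∧ ((let st := pvLoopA bs i ranges true s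
      if st.2.1 then st.1 ++ [(st.2.2, hi)] else st.1)
        = ranges ++ (s, i - 1 + ((bs.takeWhile (fun b => b == false)).length : Int))
            :: pvRunScan (bs.dropWhile (fun b => b == false)) (i + ((bs.takeWhile (fun b => b == false)).length : Int))) := by
  induction bs generalizing i ranges s with
  | nil =>
      simp only [List.length_nil, Nat.cast_zero] at hhi
      refine ⟨by simp [pvLoopA, pvRunScan_nil], ?_⟩
      simp [pvLoopA, pvRunScan_nil, hhi]
  | cons sep tl ih =>
      have hhi' : hi = (i + 1) + (tl.length : Int) - 1 := by
        simp only [List.length_cons] at hhi; push_cast at hhi ⊢; omega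
      cases sep with
      | false =>
          constructor
          · -- in_range = false, head false: start a range at i
            have h2 := (ih (i + 1) ranges i hhi').2
            rw [show pvLoopA (false :: tl) i ranges false s = pvLoopA tl (i + 1) ranges true i from rfl]
            rw [h2, pvRunScan_cons]
            simp only [Bool.false_eq_true, if_false, List.append_right_inj, List.cons.injEq,
              Prod.mk.injEq]
            refine ⟨⟨trivial, by ring⟩, ?_⟩
            congr 1
            ring
          · -- in_range = true, head false: just keep going
            have h2 := (ih (i + 1) ranges s hhi').2
            rw [show pvLoopA (false :: tl) i ranges true s = pvLoopA tl (i + 1) ranges true s from rfl]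
            rw [h2]
            simp only [List.takeWhile_cons, List.dropWhile_cons,
              List.append_right_inj, List.cons.injEq, Prod.mk.injEq]
            norm_num
            congr 1
            ring
      | true =>
          constructor
          · -- in_range = false, head true: skip
            have h1 := (ih (i + 1) ranges s hhi').1
            rw [show pvLoopA (true :: tl) i ranges false s = pvLoopA tl (i + 1) ranges false s from rfl]
            rw [h1, pvRunScan_true_cons]
          · -- in_range = true, head true: close the range at i - 1
            have h1 := (ih (i + 1) (ranges ++ [(s, i - 1)]) s hhi').1
            rw [show pvLoopA (true :: tl) i ranges true s = pvLoopA tl (i + 1) (ranges ++ [(s, i - 1)]) false s from rfl]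
            rw [h1]
            simp [pvRunScan_true_cons]

-- ===== VERDICT (by name: the statement is the Claim_ definition above) =====
theorem find_nonempty_column_ranges_spec : Claim_equal_find_nonempty_column_ranges := by
  intro lines _ hpre
  unfold Spec_find_nonempty_column_ranges find_nonempty_column_ranges find_nonempty_column_ranges_alt
  rw [if_neg hpre, if_neg hpre]
  have h := (pvLoopA_runScan (pvIsSep (pvPadded lines (pvMaxLen lines)) (pvMaxLen lines)) 0 [] 0
      ((pvMaxLen lines : Int) - 1) (by simp [pvIsSep])).1
  simp only at h ⊢
  rw [h]
  simp
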